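-- pv_equiv track=rewrite | github.com/QtyPython2020/advent_of_code | 2016/2016_day4.py | _match_to_checksum
-- ===== SOURCE A (Python) =====
-- from collections import Counter
--
-- def _match_to_checksum(check_name: str, check_sum: str) -> bool:
--     """
--
--     """
--     letter_counts = sorted(sorted(Counter(check_name).items(),
--                                   key=lambda x:x[0],
--                                   reverse=False),
--                            key=lambda x:x[1],
--                            reverse=True)
--     test_str = "".join(x[0] for x in letter_counts)[:5]
--     return test_str == check_sum
-- ===== SOURCE B (Python) =====
-- def _match_to_checksum(check_name: str, check_sum: str) -> bool:
--     counts = {}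
--     for ch in check_name:
--         counts[ch] = counts.get(ch, 0) + 1
--     buckets = {}
--     for letter, cnt in counts.items():
--         buckets.setdefault(cnt, []).append(letter)
--     result = []
--     for cnt in sorted(buckets, reverse=True):
--         result.extend(sorted(buckets[cnt]))
--     return "".join(result[:5]) == check_sum
-- ===== Notes on version B (the rewrite author's own statement) =====
-- stated objective: alternative
-- what changed: Replaces the double comparison sort over (letter,count) pairs by a frequency-bucket inversion: a count->letters dict traversed in descending count order with each bucket's letters sorted ascending.
import Mathlib
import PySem

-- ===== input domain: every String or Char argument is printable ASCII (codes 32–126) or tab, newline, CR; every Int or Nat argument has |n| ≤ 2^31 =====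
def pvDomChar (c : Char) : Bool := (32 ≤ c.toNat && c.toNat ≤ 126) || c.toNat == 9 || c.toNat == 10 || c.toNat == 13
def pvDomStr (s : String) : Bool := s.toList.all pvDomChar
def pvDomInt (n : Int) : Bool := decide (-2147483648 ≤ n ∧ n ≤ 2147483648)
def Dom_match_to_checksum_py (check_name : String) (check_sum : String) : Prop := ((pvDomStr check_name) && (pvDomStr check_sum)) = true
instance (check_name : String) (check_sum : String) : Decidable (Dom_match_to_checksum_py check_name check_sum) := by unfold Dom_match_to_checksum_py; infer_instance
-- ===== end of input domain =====

-- B computes the checksum by inverting the letter-frequency map into count buckets traversed in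
-- descending count order (letters ascending inside a bucket), instead of A's two stable sorts
-- over (letter, count) pairs; objective: alternative decomposition, no speed claim.

-- ===== PORT A =====
-- letter_counts = sorted(sorted(Counter(check_name).items(), key=x[0]), key=x[1], reverse=True)
-- test_str = "".join(x[0] for x in letter_counts)[:5] ;  return test_str == check_sum
def match_to_checksum_py (check_name : String) (check_sum : String) : Bool :=
  let letter_counts :=
    PySem.List.sorted
      (PySem.List.sorted (PySem.Dict.counter check_name.toList).items (fun x => x.1) false)
      (fun x => x.2) true
  let test_str := PySem.List.slice (letter_counts.map (fun x => x.1)) none (some 5)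
  test_str == check_sum.toList

-- ===== PORT B =====
-- counts[ch] = counts.get(ch, 0) + 1 ; buckets.setdefault(cnt, []).append(letter) ;
-- for cnt in sorted(buckets, reverse=True): result.extend(sorted(buckets[cnt])) ; "".join(result[:5]) == check_sum
def match_to_checksum_py_alt (check_name : String) (check_sum : String) : Bool :=
  let counts : PySem.Dict Char Int :=
    check_name.toList.foldl (fun d c => d.insert c (d.getD c 0 + 1)) PySem.Dict.empty
  let buckets : PySem.Dict Int (List Char) :=
    counts.items.foldl (fun b p => b.modify p.2 [] (fun l => l ++ [p.1])) PySem.Dict.empty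
  let result : List Char :=
    (PySem.List.sorted buckets.keys (fun k => k) true).foldl
      (fun acc cnt => acc ++ PySem.List.sorted (buckets.getD cnt []) (fun c => c) false) []
  PySem.List.slice result none (some 5) == check_sum.toList

-- ===== PRECONDITION & SPEC =====
def Spec_match_to_checksum_py (check_name : String) (check_sum : String) (out : Bool) : Prop := out = match_to_checksum_py_alt check_name check_sum
instance (check_name : String) (check_sum : String) (out : Bool) : Decidable (Spec_match_to_checksum_py check_name check_sum out) := by unfold Spec_match_to_checksum_py; infer_instance

-- ===== CLAIM (what is proved, stated in full; the proofs are below) =====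
def Claim_equal_match_to_checksum_py : Prop := ∀ (check_name : String) (check_sum : String), Dom_match_to_checksum_py check_name check_sum → Spec_match_to_checksum_py check_name check_sum (match_to_checksum_py check_name check_sum)

-- ===== LEMMAS AND PROOFS =====

-- The target order on pairs: count strictly descending, letter ascending on equal counts.
def pvR (a b : Char × Int) : Prop := b.2 < a.2 ∨ (a.2 = b.2 ∧ a.1 < b.1)

-- one step of A's outer (reverse=True, key=count) insertion sort keeps pvR-orderedness,
-- given that the inserted element comes alphabetically after everything already placed
lemma pv_insertBy_pairwise (x : Char × Int) (acc : List (Char × Int))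
    (hacc : acc.Pairwise pvR) (hx : ∀ y ∈ acc, y.1 < x.1) :
    (PySem.List.insertBy (fun a b => decide (b.2 < a.2)) x acc).Pairwise pvR := by
  induction acc with
  | nil => simp [PySem.List.insertBy]
  | cons y ys ih =>
    simp only [PySem.List.insertBy]
    split_ifs with h
    · simp only [decide_eq_true_eq] at h
      refine List.Pairwise.cons ?_ hacc
      intro z hz
      rcases List.mem_cons.1 hz with hz | hz
      · subst hz; exact Or.inl h
      · have hyz := List.rel_of_pairwise_cons hacc hz
        rcases hyz with h2 | ⟨h2, _⟩
        · exact Or.inl (lt_trans h2 h)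
        · exact Or.inl (h2 ▸ h)
    · simp only [decide_eq_true_eq, not_lt] at h
      refine List.Pairwise.cons ?_ (ih hacc.of_cons (fun z hz => hx z (List.mem_cons_of_mem _ hz)))
      intro z hz
      rcases (PySem.List.mem_insertBy _ _ _ _).1 hz with hz | hz
      · subst hz
        rcases lt_or_eq_of_le h with h2 | h2
        · exact Or.inl h2
        · exact Or.inr ⟨h2.symm, hx y (List.mem_cons_self)⟩
      · exact List.rel_of_pairwise_cons hacc hz

-- A's outer stable sort of an alphabetically strictly ordered list is pvR-ordered (stability)
lemma pv_foldl_ins_pairwise (L acc : List (Char × Int))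
    (hL : L.Pairwise (fun a b => a.1 < b.1)) (hacc : acc.Pairwise pvR)
    (hcross : ∀ y ∈ acc, ∀ x ∈ L, y.1 < x.1) :
    (L.foldl (fun acc x => PySem.List.insertBy (fun a b => decide ((fun p : Char × Int => p.2) b < (fun p : Char × Int => p.2) a)) x acc) acc).Pairwise pvR := by
  induction L generalizing acc with
  | nil => exact hacc
  | cons x L ih =>
    simp only [List.foldl_cons]
    refine ih _ hL.of_cons
      (pv_insertBy_pairwise x acc hacc (fun y hy => hcross y hy x List.mem_cons_self)) ?_
    intro y hy z hz
    rcases (PySem.List.mem_insertBy _ _ _ _).1 hy with hy | hy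
    · subst hy; exact List.rel_of_pairwise_cons hL hz
    · exact hcross y hy z (List.mem_cons_of_mem _ hz)

lemma pv_sorted_rev_pairwise (L : List (Char × Int))
    (hL : L.Pairwise (fun a b => a.1 < b.1)) :
    (PySem.List.sorted L (fun x => x.2) true).Pairwise pvR := by
  rw [PySem.List.sorted_rev_eq_foldl_insertBy]
  exact pv_foldl_ins_pairwise L [] hL (by simp) (by simp)

-- a nodup list of keys covering all key-values partitions a list (any order of the keys)
lemma pv_partition_perm (key : Char → Int) (ks : List Int) (l : List Char)
    (hnd : ks.Nodup) (hcov : ∀ x ∈ l, key x ∈ ks) :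
    (ks.flatMap (fun k => l.filter (fun x => key x == k))).Perm l := by
  induction ks generalizing l with
  | nil =>
    have : l = [] := by
      cases l with
      | nil => rfl
      | cons a t => exact absurd (hcov a List.mem_cons_self) (List.not_mem_nil)
    simp [this]
  | cons k ks ih =>
    simp only [List.flatMap_cons]
    have hfilter : ∀ k' ∈ ks,
        (l.filter (fun x => !(key x == k))).filter (fun x => key x == k')
          = l.filter (fun x => key x == k') := by
      intro k' hk'
      rw [List.filter_filter]
      apply List.filter_congr
      intro x hx
      by_cases h : key x = k'
      · have hne : ¬ k' = k := fun hc => (List.nodup_cons.1 hnd).1 (hc ▸ hk')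
        simp [h, hne]
      · simp [h]
    have hcov' : ∀ x ∈ l.filter (fun x => !(key x == k)), key x ∈ ks := by
      intro x hx
      rcases List.mem_filter.1 hx with ⟨hxl, hxk⟩
      rcases List.mem_cons.1 (hcov x hxl) with h | h
      · simp [h] at hxk
      · exact h
    have hperm := ih (l.filter (fun x => !(key x == k))) (List.nodup_cons.1 hnd).2 hcov'
    refine List.Perm.trans ?_ (List.filter_append_perm (fun x => key x == k) l)
    refine List.Perm.append_left _ ?_
    refine List.Perm.trans ?_ hperm
    exact List.Perm.flatMap_left ks (fun k' hk' => by rw [hfilter k' hk'])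

theorem match_to_checksum_py_spec : Claim_equal_match_to_checksum_py := by
  intro check_name check_sum _
  unfold Spec_match_to_checksum_py match_to_checksum_py match_to_checksum_py_alt
  dsimp only
  set s := check_name.toList with hs
  set letters := PySem.Set.ofList s with hletters
  set cnt : Char → Int := fun c => (s.count c : Int) with hcnt
  set items := letters.map (fun k => (k, cnt k)) with hitems_def
  set Q : Char → Char → Prop := fun c d => cnt d < cnt c ∨ (cnt c = cnt d ∧ c < d) with hQ
  -- items of the Counter
  have hitems : (PySem.Dict.counter s).items = items := PySem.Dict.items_counter s
  -- A side
  have hinner_lt : (PySem.List.sorted items (fun x => x.1) false).Pairwise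
      (fun a b : Char × Int => a.1 < b.1) := by
    have h1 := PySem.List.sorted_pairwise items (fun x => x.1)
    have hmapeq : items.map (fun x => x.1) = letters := by
      rw [hitems_def, List.map_map]; exact List.map_id'' (congrFun rfl) _
    have hnd : ((PySem.List.sorted items (fun x => x.1) false).map (fun x => x.1)).Nodup := by
      refine ((PySem.List.sorted_perm items (fun x => x.1) false).map (fun x => x.1)).symm.nodup ?_
      rw [hmapeq]; exact PySem.Set.nodup_ofList _
    have h2 : (PySem.List.sorted items (fun x => x.1) false).Pairwise
        (fun a b : Char × Int => a.1 ≠ b.1) := List.pairwise_map.1 hnd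
    exact (h1.and h2).imp (fun h => lt_of_le_of_ne h.1 h.2)
  have hA_pair := pv_sorted_rev_pairwise _ hinner_lt
  have hA_perm : (PySem.List.sorted (PySem.List.sorted items (fun x => x.1) false)
      (fun x => x.2) true).Perm items :=
    (PySem.List.sorted_perm _ _ _).trans (PySem.List.sorted_perm _ _ _)
  have hmemA : ∀ p ∈ PySem.List.sorted (PySem.List.sorted items (fun x => x.1) false)
      (fun x => x.2) true, p.2 = cnt p.1 := by
    intro p hp
    have := hA_perm.mem_iff.1 hp
    rw [hitems_def] at this
    rcases List.mem_map.1 this with ⟨k, _, rfl⟩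
    rfl
  have hA_Q : ((PySem.List.sorted (PySem.List.sorted items (fun x => x.1) false)
      (fun x => x.2) true).map (fun x => x.1)).Pairwise Q := by
    rw [List.pairwise_map]
    refine hA_pair.imp_of_mem ?_
    intro a b ha hb hr
    rcases hr with h | ⟨h1, h2⟩
    · exact Or.inl (by rw [← hmemA a ha, ← hmemA b hb]; exact h)
    · exact Or.inr ⟨by rw [← hmemA a ha, ← hmemA b hb]; exact h1, h2⟩
  have hpermA : ((PySem.List.sorted (PySem.List.sorted items (fun x => x.1) false)
      (fun x => x.2) true).map (fun x => x.1)).Perm letters := by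
    refine (hA_perm.map _).trans ?_
    have : items.map (fun x => x.1) = letters := by
      rw [hitems_def, List.map_map]; exact List.map_id'' (congrFun rfl) _
    rw [this]
  -- B side
  have hcounts : s.foldl (fun d c => d.insert c (d.getD c 0 + 1)) PySem.Dict.empty
      = PySem.Dict.counter s := PySem.Dict.foldl_insert_getD_add_one_eq_counter s
  rw [hcounts, hitems]
  set buckets := items.foldl (fun b p => b.modify p.2 [] (fun l => l ++ [p.1]))
      (PySem.Dict.empty : PySem.Dict Int (List Char)) with hbuckets
  have hfoldswap : buckets = (items.map (fun p => (p.2, p.1))).foldl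
      (fun d p => d.modify p.1 [] (fun l => l ++ [p.2])) PySem.Dict.empty := by
    rw [List.foldl_map]
  have hbget : ∀ c, buckets.getD c [] = letters.filter (fun ch => cnt ch == c) := by
    intro c
    rw [hfoldswap, PySem.Dict.getD_foldl_modify_append]
    simp only [hitems_def, List.filter_map, List.map_map, Function.comp_def]
    exact List.map_id'' (congrFun rfl) _
  have hkeys : buckets.keys = PySem.Set.ofList (items.map (fun p => p.2)) := by
    rw [hbuckets, PySem.Dict.keys_foldl_modify_key items (fun p => p.2)]
    rw [show (PySem.Dict.empty : PySem.Dict Int (List Char)).keys = [] from rfl,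
      PySem.Set.update_nil_left]
  have hkeys_nodup : buckets.keys.Nodup := by
    rw [hkeys]; exact PySem.Set.nodup_ofList _
  set cs := PySem.List.sorted buckets.keys (fun k => k) true with hcs
  have hcs_perm : cs.Perm buckets.keys := PySem.List.sorted_perm _ _ _
  have hcs_gt : cs.Pairwise (fun a b : Int => b < a) := by
    have h1 := PySem.List.sorted_pairwise_rev buckets.keys (fun k => k)
    have h2 : cs.Pairwise (fun a b : Int => a ≠ b) := (hcs_perm.symm.nodup hkeys_nodup)
    exact (h1.and h2).imp (fun h => lt_of_le_of_ne h.1 (Ne.symm h.2))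
  have hresult : (cs.foldl (fun acc cnt => acc ++ PySem.List.sorted (buckets.getD cnt [])
        (fun c => c) false) [])
      = cs.flatMap (fun c => PySem.List.sorted (buckets.getD c []) (fun x => x) false) := by
    rw [PySem.List.foldl_append_eq_flatMap]
    rfl
  have hbucket_mem : ∀ c, ∀ x ∈ PySem.List.sorted (buckets.getD c []) (fun x => x) false,
      cnt x = c := by
    intro c x hx
    have := (PySem.List.mem_sorted _ _ _ _).1 hx
    rw [hbget c] at this
    exact eq_of_beq (List.mem_filter.1 this).2
  have hB_Q : (cs.flatMap (fun c => PySem.List.sorted (buckets.getD c [])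
      (fun x => x) false)).Pairwise Q := by
    rw [List.pairwise_flatMap]
    constructor
    · intro c _
      have hnd : (buckets.getD c []).Nodup := by
        rw [hbget c]; exact (PySem.Set.nodup_ofList s).filter _
      have h1 := PySem.List.sorted_pairwise (buckets.getD c []) (fun x => x)
      have h2 : (PySem.List.sorted (buckets.getD c []) (fun x => x) false).Pairwise
          (fun a b : Char => a ≠ b) := ((PySem.List.sorted_perm _ _ _).symm.nodup hnd)
      refine ((h1.and h2).imp_of_mem ?_)
      intro a b ha hb hr
      exact Or.inr ⟨by rw [hbucket_mem c a ha, hbucket_mem c b hb],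
        lt_of_le_of_ne hr.1 hr.2⟩
    · refine hcs_gt.imp_of_mem ?_
      intro c c' _ _ hlt x hx y hy
      exact Or.inl (by rw [hbucket_mem c x hx, hbucket_mem c' y hy]; exact hlt)
  have hpermB : (cs.flatMap (fun c => PySem.List.sorted (buckets.getD c [])
      (fun x => x) false)).Perm letters := by
    refine List.Perm.trans (List.Perm.flatMap_left cs
      (fun c _ => (PySem.List.sorted_perm (buckets.getD c []) _ _))) ?_
    have hcov : ∀ x ∈ letters, cnt x ∈ cs := by
      intro x hx
      have : cnt x ∈ items.map (fun p => p.2) := by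
        rw [hitems_def, List.map_map]
        exact List.mem_map.2 ⟨x, hx, rfl⟩
      rw [PySem.List.mem_sorted]
      rw [hkeys]
      exact (PySem.Set.mem_ofList _ _).2 this
    have hcsnd : cs.Nodup := hcs_perm.symm.nodup hkeys_nodup
    have := pv_partition_perm cnt cs letters hcsnd hcov
    refine List.Perm.trans ?_ this
    exact List.Perm.flatMap_left cs (fun c _ => by rw [hbget c])
  -- uniqueness
  have hmain : (PySem.List.sorted (PySem.List.sorted items (fun x => x.1) false)
        (fun x => x.2) true).map (fun x => x.1)
      = cs.flatMap (fun c => PySem.List.sorted (buckets.getD c []) (fun x => x) false) := by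
    refine List.Perm.eq_of_pairwise ?_ hA_Q hB_Q (hpermA.trans hpermB.symm)
    intro a b _ _ hab hba
    rcases hab with h | ⟨h1, h2⟩
    · rcases hba with h' | ⟨h1', _⟩
      · exact absurd (lt_trans h h') (lt_irrefl _)
      · exact absurd h (h1' ▸ lt_irrefl _)
    · rcases hba with h' | ⟨_, h2'⟩
      · exact absurd h' (h1 ▸ lt_irrefl _)
      · exact absurd (lt_trans h2 h2') (lt_irrefl _)
  rw [hresult, ← hmain]
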